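-- pv_equiv track=rewrite | github.com/tannguyenjin91/Quota-monitor | routes/web.py | choose_default_drill_variable
-- ===== SOURCE A (Python) =====
-- def choose_default_drill_variable(variable_choices):
--     if not variable_choices:
--         return ""
--     preferred_codes = ["S2", "Q9"]
--     for preferred_code in preferred_codes:
--         for item in variable_choices:
--             if item["variable_code"] == preferred_code:
--                 return preferred_code
--     return variable_choices[0]["variable_code"]
-- ===== SOURCE B (Python) =====
-- def choose_default_drill_variable(variable_choices):
--     if not variable_choices:
--         return ""
--     seen_q9 = False
--     for item in variable_choices:
--         code = item["variable_code"]
--         if code == "S2":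
--             return "S2"
--         if code == "Q9":
--             seen_q9 = True
--     return "Q9" if seen_q9 else variable_choices[0]["variable_code"]
-- ===== Notes on version B (the rewrite author's own statement) =====
-- stated objective: simpler
-- what changed: Replaces A's two sequential scans over the list (one per preferred code) with a single priority-aware pass that returns 'S2' immediately and remembers whether 'Q9' was seen.
import Mathlib
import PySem

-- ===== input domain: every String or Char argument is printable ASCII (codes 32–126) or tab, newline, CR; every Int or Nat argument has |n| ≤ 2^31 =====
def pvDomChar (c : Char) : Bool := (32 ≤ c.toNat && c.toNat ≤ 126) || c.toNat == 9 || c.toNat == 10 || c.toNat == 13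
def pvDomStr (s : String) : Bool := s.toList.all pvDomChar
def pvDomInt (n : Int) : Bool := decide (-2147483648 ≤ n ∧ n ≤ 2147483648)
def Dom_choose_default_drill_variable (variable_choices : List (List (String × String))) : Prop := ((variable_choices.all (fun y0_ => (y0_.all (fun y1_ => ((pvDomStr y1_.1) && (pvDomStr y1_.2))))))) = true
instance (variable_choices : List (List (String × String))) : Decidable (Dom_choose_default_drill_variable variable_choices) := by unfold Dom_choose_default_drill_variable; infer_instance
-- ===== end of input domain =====

-- B replaces A's two sequential scans (one per preferred code) with one priority-aware pass: simpler, single traversal.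

-- shared helper: first-match dict lookup of "variable_code" (none = KeyError, excluded by Pre_)
def pvCode (item : List (String × String)) : Option String :=
  (item.find? (fun p => p.1 == "variable_code")).map (·.2)

-- ===== PORT A =====
-- inner loop: 'for item in variable_choices: if item["variable_code"] == preferred_code: return preferred_code'
def innerA (code : String) (items : List (List (String × String))) : Option String :=
  match items with
  | [] => none
  | it :: rest => if (pvCode it).getD "" = code then some code else innerA code rest

-- outer loop: 'for preferred_code in preferred_codes:'
def outerA (codes : List String) (items : List (List (String × String))) : Option String :=
  match codes with
  | [] => none
  | c :: rest =>
    match innerA c items with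
    | some r => some r
    | none => outerA rest items

def choose_default_drill_variable (variable_choices : List (List (String × String))) : String :=
  match variable_choices with
  | [] => ""
  | first :: _ =>
    match outerA ["S2", "Q9"] variable_choices with
    | some r => r
    | none => (pvCode first).getD ""

-- ===== PORT B =====
-- single pass with a seen_q9 flag; 'first' carries variable_choices[0] for the final return
def altLoop (items : List (List (String × String))) (seenQ9 : Bool)
    (first : List (String × String)) : String :=
  match items with
  | [] => if seenQ9 then "Q9" else (pvCode first).getD ""
  | it :: rest =>
    let code := (pvCode it).getD ""
    if code = "S2" then "S2" else altLoop rest (seenQ9 || code == "Q9") first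

def choose_default_drill_variable_alt (variable_choices : List (List (String × String))) : String :=
  match variable_choices with
  | [] => ""
  | first :: _ => altLoop variable_choices false first

-- ===== PRECONDITION & SPEC =====
def pvHasKey (item : List (String × String)) : Bool := item.any (fun p => p.1 == "variable_code")

-- Pre_ excludes exactly the inputs where Python A raises KeyError: some item lacks the
-- "variable_code" key and no "S2" item precedes the first such item (both A and B raise there).
def Pre_choose_default_drill_variable (variable_choices : List (List (String × String))) : Prop :=
  (variable_choices.takeWhile pvHasKey).length = variable_choices.length ∨
  ((variable_choices.takeWhile pvHasKey).any (fun it => pvCode it == some "S2")) = true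

instance (variable_choices : List (List (String × String))) : Decidable (Pre_choose_default_drill_variable variable_choices) := by
  unfold Pre_choose_default_drill_variable; infer_instance

def pvWitness_choose_default_drill_variable : (List (List (String × String))) :=
  [[("variable_code", "Q9")], [("variable_code", "X1")]]

def Spec_choose_default_drill_variable (variable_choices : List (List (String × String))) (out : String) : Prop := out = choose_default_drill_variable_alt variable_choices
instance (variable_choices : List (List (String × String))) (out : String) : Decidable (Spec_choose_default_drill_variable variable_choices out) := by unfold Spec_choose_default_drill_variable; infer_instance

-- ===== CLAIM (what is proved, stated in full; the proofs are below) =====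
def Claim_equal_choose_default_drill_variable : Prop := ∀ (variable_choices : List (List (String × String))), Dom_choose_default_drill_variable variable_choices → Pre_choose_default_drill_variable variable_choices → Spec_choose_default_drill_variable variable_choices (choose_default_drill_variable variable_choices)

-- ===== LEMMAS AND PROOFS =====

-- innerA only ever returns the searched code
theorem innerA_eq (code : String) (items : List (List (String × String))) :
    innerA code items = none ∨ innerA code items = some code := by
  induction items with
  | nil => left; rfl
  | cons it rest ih =>
    by_cases h : (pvCode it).getD "" = code
    · right; simp [innerA, h]
    · simpa [innerA, h] using ih

-- B's single pass computed from A's two scans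
theorem altLoop_eq (items : List (List (String × String))) (b : Bool)
    (first : List (String × String)) :
    altLoop items b first =
      match innerA "S2" items with
      | some c => c
      | none =>
        if b then "Q9" else
          match innerA "Q9" items with
          | some c => c
          | none => (pvCode first).getD "" := by
  induction items generalizing b with
  | nil => cases b <;> simp [altLoop, innerA]
  | cons it rest ih =>
    by_cases hs : (pvCode it).getD "" = "S2"
    · simp [altLoop, innerA, hs]
    · by_cases hq : (pvCode it).getD "" = "Q9"
      · simp [altLoop, innerA, hq, ih]
      · have : ((pvCode it).getD "" == "Q9") = false := by simp [hq]
        simp [altLoop, innerA, hs, hq, this, ih]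

-- ===== VERDICT (by name: the statement is the Claim_ definition above) =====
theorem choose_default_drill_variable_spec : Claim_equal_choose_default_drill_variable := by
  intro vcs _ _
  unfold Spec_choose_default_drill_variable
  cases vcs with
  | nil => rfl
  | cons first rest =>
    simp only [choose_default_drill_variable, choose_default_drill_variable_alt,
      altLoop_eq, outerA]
    rcases innerA_eq "S2" (first :: rest) with h | h <;>
      rcases innerA_eq "Q9" (first :: rest) with h' | h' <;>
      simp [h, h']
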